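-- pv_equiv track=rewrite | github.com/suresh-vuppala/interview-ignite-lab | src/data/courses/dsa/prefix-sum/prefix-sum-fundamentals/count-odd-even-subarrays/code/python/count_odd_even_subarrays.py | count_odd_even_prefix_sum
-- ===== SOURCE A (Python) =====
-- def count_odd_even_prefix_sum(nums):
--     """
--     Transform: odd → +1, even → -1
--     Problem becomes: count subarrays with sum = 0
--     """
--     prefix_sum_map = {0: 1}  # Empty prefix
--     prefix_sum = 0
--     count = 0
--
--     for num in nums:
--         # Transform: odd → +1, even → -1
--         if num % 2 == 1:
--             prefix_sum += 1
--         else: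
--             prefix_sum -= 1
--
--         # If this prefix sum seen before, all previous occurrences
--         # form valid subarrays (sum = 0) with current position
--         if prefix_sum in prefix_sum_map:
--             count += prefix_sum_map[prefix_sum]
--             prefix_sum_map[prefix_sum] += 1
--         else:
--             prefix_sum_map[prefix_sum] = 1
--
--     return count
-- ===== SOURCE B (Python) =====
-- def count_odd_even_prefix_sum(nums):
--     # Phase 1: list of all prefix sums of the +1/-1 transform (incl. empty prefix).
--     prefixes = [0]
--     s = 0
--     for num in nums:
--         s = s + 1 if num % 2 == 1 else s - 1
--         prefixes.append(s)
--     # Phase 2: frequency table of prefix-sum values.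
--     freq = {}
--     for p in prefixes:
--         freq[p] = freq.get(p, 0) + 1
--     # Phase 3: each pair of equal prefix sums is one balanced subarray.
--     return sum(c * (c - 1) // 2 for c in freq.values())
-- ===== Notes on version B (the rewrite author's own statement) =====
-- stated objective: alternative
-- what changed: B builds the full list of prefix sums, tallies a frequency table in a second pass, and counts pairs combinatorially with sum of c*(c-1)//2, instead of A's incremental add-previous-occurrences inside one loop.
import Mathlib
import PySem

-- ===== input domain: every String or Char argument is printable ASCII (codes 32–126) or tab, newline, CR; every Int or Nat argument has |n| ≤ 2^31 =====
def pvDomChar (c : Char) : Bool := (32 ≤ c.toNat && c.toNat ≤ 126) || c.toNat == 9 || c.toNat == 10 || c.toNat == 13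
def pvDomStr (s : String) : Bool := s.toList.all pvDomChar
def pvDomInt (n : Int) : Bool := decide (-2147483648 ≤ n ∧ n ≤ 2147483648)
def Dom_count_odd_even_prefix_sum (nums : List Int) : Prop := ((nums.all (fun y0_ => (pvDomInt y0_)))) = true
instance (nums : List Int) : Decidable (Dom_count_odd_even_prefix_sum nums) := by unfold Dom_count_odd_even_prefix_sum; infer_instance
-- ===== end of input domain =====

-- B replaces A's incremental pair counting with a three-phase computation: all prefix
-- sums, then a frequency table, then the combinatorial count Σ c*(c-1)//2 (alternative
-- decomposition, same cost).

-- ===== PORT A =====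
def count_odd_even_prefix_sum (nums : List Int) : Int :=
  let r := nums.foldl (fun (st : PySem.Dict Int Int × Int × Int) num =>
    let ps := if PySem.Int.mod num 2 == 1 then st.2.1 + 1 else st.2.1 - 1
    if st.1.contains ps then
      (st.1.modify ps 0 (· + 1), ps, st.2.2 + st.1.getD ps 0)
    else
      (st.1.insert ps 1, ps, st.2.2)) (PySem.Dict.ofList [(0, 1)], 0, 0)
  r.2.2

-- ===== PORT B =====
def pvC2 (c : Int) : Int := PySem.Int.floordiv (c * (c - 1)) 2

def count_odd_even_prefix_sum_alt (nums : List Int) : Int :=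
  let pr := nums.foldl (fun (st : List Int × Int) num =>
      let s := if PySem.Int.mod num 2 == 1 then st.2 + 1 else st.2 - 1
      (st.1 ++ [s], s)) ([0], 0)
  let freq := pr.1.foldl (fun (d : PySem.Dict Int Int) p => d.insert p (d.getD p 0 + 1)) PySem.Dict.empty
  freq.values.foldl (fun acc c => acc + pvC2 c) 0

-- ===== PRECONDITION & SPEC =====
def Spec_count_odd_even_prefix_sum (nums : List Int) (out : Int) : Prop := out = count_odd_even_prefix_sum_alt nums
instance (nums : List Int) (out : Int) : Decidable (Spec_count_odd_even_prefix_sum nums out) := by unfold Spec_count_odd_even_prefix_sum; infer_instance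

-- ===== CLAIM (what is proved, stated in full; the proofs are below) =====
def Claim_equal_count_odd_even_prefix_sum : Prop := ∀ (nums : List Int), Dom_count_odd_even_prefix_sum nums → Spec_count_odd_even_prefix_sum nums (count_odd_even_prefix_sum nums)

-- ===== LEMMAS AND PROOFS =====

-- the ±1 transform
def pvF (num : Int) : Int := if PySem.Int.mod num 2 == 1 then 1 else -1

-- prefix sums of the transform after starting value s (without the head)
def pvPrefs (s : Int) : List Int → List Int
  | [] => []
  | n :: t => (s + pvF n) :: pvPrefs (s + pvF n) t

-- Σ over the distinct values of L of C2(multiplicity)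
def pvSC2 (L : List Int) : Int :=
  ((PySem.List.dedup L).map (fun k => pvC2 ((L.count k : Int)))).sum

lemma pvC2_succ (c : Int) : pvC2 (c + 1) = pvC2 c + c := by
  have h : (c + 1) * (c + 1 - 1) = c * (c - 1) + c * 2 := by ring
  simp only [pvC2, h]
  show Int.fdiv _ 2 = Int.fdiv _ 2 + c
  rw [Int.add_mul_fdiv_right _ _ (by norm_num)]

lemma pv_modify_insert (d : PySem.Dict Int Int) (k : Int) :
    d.modify k 0 (· + 1) = d.insert k (d.getD k 0 + 1) := by
  simp [PySem.Dict.modify, PySem.Dict.insert, PySem.Dict.getD]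

lemma pv_sum_map_update (ks : List Int) (hnd : ks.Nodup) (x : Int) (hx : x ∈ ks)
    (f g : Int → Int) (h : ∀ k ∈ ks, k ≠ x → f k = g k) :
    (ks.map f).sum = (ks.map g).sum + (f x - g x) := by
  induction ks with
  | nil => cases hx
  | cons a t ih =>
    simp only [List.map_cons, List.sum_cons]
    rcases List.mem_cons.mp hx with rfl | hxt
    · have hcg : ∀ k ∈ t, f k = g k := fun k hk =>
        h k (List.mem_cons_of_mem _ hk)
          (fun he => (List.nodup_cons.mp hnd).1 (he ▸ hk))
      rw [List.map_congr_left hcg]; ring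
    · have hax : a ≠ x := fun he => (List.nodup_cons.mp hnd).1 (he ▸ hxt)
      rw [ih (List.nodup_cons.mp hnd).2 hxt
            (fun k hk hne => h k (List.mem_cons_of_mem _ hk) hne),
          h a (List.mem_cons_self ..) hax]
      ring

lemma pvSC2_append (L : List Int) (x : Int) :
    pvSC2 (L ++ [x]) = pvSC2 L + L.count x := by
  simp only [pvSC2, PySem.List.dedup_eq_ofList]
  have hofl : PySem.Set.ofList (L ++ [x]) = PySem.Set.add (PySem.Set.ofList L) x := by
    rw [PySem.Set.ofList_eq_foldl, PySem.Set.ofList_eq_foldl, List.foldl_append]; rfl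
  have hcount_ne : ∀ k : Int, k ≠ x → (L ++ [x]).count k = L.count k := by
    intro k hk
    simp [List.count_append, hk.symm]
  by_cases hx : x ∈ L
  · have hadd : PySem.Set.add (PySem.Set.ofList L) x = PySem.Set.ofList L := by
      simp [PySem.Set.add, PySem.Set.mem_ofList, hx]
    rw [hofl, hadd]
    rw [pv_sum_map_update (PySem.Set.ofList L) (PySem.Set.nodup_ofList L) x
          ((PySem.Set.mem_ofList ..).mpr hx)
          (fun k => pvC2 ((((L ++ [x]).count k : Nat)) : Int))
          (fun k => pvC2 ((L.count k : Nat) : Int))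
          (fun k _ hk => by simp only [hcount_ne k hk])]
    have hcx : ((L ++ [x]).count x : Int) = (L.count x : Int) + 1 := by
      simp [List.count_append]
    rw [hcx, pvC2_succ]
    ring
  · have hadd : PySem.Set.add (PySem.Set.ofList L) x = PySem.Set.ofList L ++ [x] := by
      simp [PySem.Set.add, PySem.Set.mem_ofList, hx]
    rw [hofl, hadd]
    rw [List.map_append, List.sum_append]
    have h1 : ∀ k ∈ PySem.Set.ofList L,
        pvC2 (((L ++ [x]).count k : Nat) : Int) = pvC2 ((L.count k : Nat) : Int) := by
      intro k hk
      have : k ≠ x := fun he => hx (he ▸ (PySem.Set.mem_ofList ..).mp hk)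
      rw [hcount_ne k this]
    rw [List.map_congr_left h1]
    have hLx : L.count x = 0 := List.count_eq_zero.mpr hx
    have hone : pvC2 1 = 0 := by decide
    simp [List.count_append, hLx, hone]

lemma pv_counter_snoc (L : List Int) (x : Int) :
    PySem.Dict.counter (L ++ [x])
      = (PySem.Dict.counter L).insert x ((PySem.Dict.counter L).getD x 0 + 1) := by
  rw [PySem.Dict.counter_append_singleton]
  exact pv_modify_insert _ _

lemma pv_loopA (nums : List Int) : ∀ (L : List Int) (s c : Int), c = pvSC2 L →
    nums.foldl (fun (st : PySem.Dict Int Int × Int × Int) num =>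
      let ps := if PySem.Int.mod num 2 == 1 then st.2.1 + 1 else st.2.1 - 1
      if st.1.contains ps then
        (st.1.modify ps 0 (· + 1), ps, st.2.2 + st.1.getD ps 0)
      else
        (st.1.insert ps 1, ps, st.2.2)) (PySem.Dict.counter L, s, c)
    = (PySem.Dict.counter (L ++ pvPrefs s nums),
       (pvPrefs s nums).getLastD s, pvSC2 (L ++ pvPrefs s nums)) := by
  induction nums with
  | nil => intro L s c hc; simp [pvPrefs, hc]
  | cons n t ih =>
    intro L s c hc
    have hps : (if PySem.Int.mod n 2 == 1 then s + 1 else s - 1) = s + pvF n := by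
      unfold pvF; split_ifs <;> ring
    have hRHS : ∀ z : List Int, L ++ pvPrefs s (n :: t) = (L ++ [s + pvF n]) ++ pvPrefs (s + pvF n) t := by
      intro _; simp [pvPrefs]
    have hlast : (pvPrefs s (n :: t)).getLastD s = (pvPrefs (s + pvF n) t).getLastD (s + pvF n) := by
      rw [show pvPrefs s (n :: t) = (s + pvF n) :: pvPrefs (s + pvF n) t from rfl,
          List.getLastD_cons]
    rw [List.foldl_cons, hRHS [], hlast]
    by_cases hcont : (PySem.Dict.counter L).contains (s + pvF n)
    · have hmem : (s + pvF n) ∈ L := by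
        simpa [PySem.Dict.contains_counter] using hcont
      have hdict : ((PySem.Dict.counter L).modify (s + pvF n) 0 (· + 1))
          = PySem.Dict.counter (L ++ [s + pvF n]) :=
        (PySem.Dict.counter_append_singleton ..).symm
      have hcnt : c + (PySem.Dict.counter L).getD (s + pvF n) 0
          = pvSC2 (L ++ [s + pvF n]) := by
        rw [hc, PySem.Dict.getD_counter, pvSC2_append]
      simp only [hps, hcont, if_true]
      rw [hdict, hcnt, ih (L ++ [s + pvF n]) (s + pvF n) _ rfl]
    · have hmem : (s + pvF n) ∉ L := by
        intro h
        exact hcont (by simpa [PySem.Dict.contains_counter] using h)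
      have hdict : ((PySem.Dict.counter L).insert (s + pvF n) 1)
          = PySem.Dict.counter (L ++ [s + pvF n]) := by
        rw [pv_counter_snoc, PySem.Dict.getD_counter, List.count_eq_zero.mpr hmem]
        norm_num
      have hcnt : c = pvSC2 (L ++ [s + pvF n]) := by
        rw [hc, pvSC2_append, List.count_eq_zero.mpr hmem]
        norm_num
      simp only [hps, hcont]
      rw [hdict]
      rw [show c = pvSC2 (L ++ [s + pvF n]) from hcnt]
      exact ih (L ++ [s + pvF n]) (s + pvF n) _ rfl

lemma pv_loopB (nums : List Int) : ∀ (acc : List Int) (s : Int),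
    nums.foldl (fun (st : List Int × Int) num =>
      let t := if PySem.Int.mod num 2 == 1 then st.2 + 1 else st.2 - 1
      (st.1 ++ [t], t)) (acc, s)
    = (acc ++ pvPrefs s nums, (pvPrefs s nums).getLastD s) := by
  induction nums with
  | nil => intro acc s; simp [pvPrefs]
  | cons n t ih =>
    intro acc s
    rw [List.foldl_cons]
    have hps : (if PySem.Int.mod n 2 == 1 then s + 1 else s - 1) = s + pvF n := by
      unfold pvF; split_ifs <;> ring
    simp only [hps]
    rw [ih (acc ++ [s + pvF n]) (s + pvF n)]
    rw [show pvPrefs s (n :: t) = (s + pvF n) :: pvPrefs (s + pvF n) t from rfl,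
        List.getLastD_cons]
    simp

lemma pv_alt_eq_SC2 (nums : List Int) :
    count_odd_even_prefix_sum_alt nums = pvSC2 (0 :: pvPrefs 0 nums) := by
  unfold count_odd_even_prefix_sum_alt
  rw [pv_loopB nums [0] 0]
  simp only []
  rw [PySem.Dict.foldl_insert_getD_add_one_eq_counter]
  have hval : (PySem.Dict.counter ([0] ++ pvPrefs 0 nums)).values
      = (PySem.Set.ofList ([0] ++ pvPrefs 0 nums)).map
          (fun k => ((([0] ++ pvPrefs 0 nums).count k : Nat) : Int)) := by
    show (PySem.Dict.counter ([0] ++ pvPrefs 0 nums)).items.map (·.2) = _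
    rw [PySem.Dict.items_counter, List.map_map]
    rfl
  rw [hval, PySem.List.foldl_add, List.map_map]
  simp only [pvSC2, PySem.List.dedup_eq_ofList]
  have : ([0] ++ pvPrefs 0 nums) = (0 :: pvPrefs 0 nums) := rfl
  rw [this]
  simp [Function.comp_def]

-- ===== VERDICT (by name: the statement is the Claim_ definition above) =====
theorem count_odd_even_prefix_sum_spec : Claim_equal_count_odd_even_prefix_sum := by
  intro nums _
  unfold Spec_count_odd_even_prefix_sum count_odd_even_prefix_sum
  rw [pv_alt_eq_SC2]
  have h0 : PySem.Dict.ofList [((0:Int), (1:Int))] = PySem.Dict.counter [(0:Int)] := by decide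
  have hc0 : (0 : Int) = pvSC2 [0] := by decide
  simp only []
  rw [h0, pv_loopA nums [0] 0 0 hc0]
  rfl
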